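-- pv_equiv track=rewrite | github.com/mixmikmic/GH_code_analysis | python/Digital-Assyriology-HW.py | partitioning
-- ===== SOURCE A (Python) =====
-- def partitioning(line_no):    #Partitioning depends on the text used.
--
--     ln = int(''.join(c for c in line_no if c.isdigit()))
--
--     if(ln <= 13):
--         return "1.1"
--     elif (ln <= 21):
--         return "1.2"
--
--     elif (ln <= 39):
--         return "2.1.1"
--     elif (ln <= 51):
--         return "2.1.2"
--     elif (ln <= 69):
--         return "2.1.3"
--
--     elif (ln <= 76):
--         return "2.2.1"
--     elif (ln <= 90):
--         return "2.2.2"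
--     elif (ln <= 113):
--         return "2.2.3"
--
--     elif (ln <= 127):
--         return "2.3.1"
--     elif (ln <= 132):
--         return "2.3.2"
--     elif (ln <= 134):
--         return "2.3.3"
--
--     elif (ln <= 138):
--         return "3.1.1"
--     elif (ln <= 149):
--         return "3.1.2"
--     elif (ln <= 162):
--         return "3.1.3"
--     elif (ln <= 169):
--         return "3.1.4"
--
--     elif (ln <= 184):
--         return "3.2.1"
--     elif (ln <= 197):
--         return "3.2.2"
--     elif (ln <= 205):
--         return "3.2.3"
--     elif (ln <= 210):
--         return "3.2.4"
--     elif (ln <= 221):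
--         return "3.2.5"
--
--     elif (ln <= 227):
--         return "4.1"
--
--     elif (ln <= 248):
--         return "4.2.1"
--     elif (ln <= 254):
--         return "4.2.2"
--     elif (ln <= 263):
--         return "4.2.3"
--     elif (ln <= 273):
--         return "4.2.4"
--
--     elif (ln <= 280):
--         return "5.1"
--     elif (ln <= 283):
--         return "5.2"
--     elif (ln <= 310):
--         return "B"
--     return "0"
-- ===== SOURCE B (Python) =====
-- # Binary search over a sorted threshold table instead of a linear if/elif chain.
-- _THRESHOLDS = [13, 21, 39, 51, 69, 76, 90, 113, 127, 132, 134, 138, 149, 162,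
--                169, 184, 197, 205, 210, 221, 227, 248, 254, 263, 273, 280, 283, 310]
-- _LABELS = ["1.1", "1.2", "2.1.1", "2.1.2", "2.1.3", "2.2.1", "2.2.2", "2.2.3",
--            "2.3.1", "2.3.2", "2.3.3", "3.1.1", "3.1.2", "3.1.3", "3.1.4",
--            "3.2.1", "3.2.2", "3.2.3", "3.2.4", "3.2.5", "4.1",
--            "4.2.1", "4.2.2", "4.2.3", "4.2.4", "5.1", "5.2", "B"]
--
-- def partitioning(line_no):
--     ln = int(''.join(c for c in line_no if c.isdigit()))
--     lo, hi = 0, len(_THRESHOLDS)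
--     while lo < hi:
--         mid = (lo + hi) // 2
--         if _THRESHOLDS[mid] < ln:
--             lo = mid + 1
--         else:
--             hi = mid
--     return _LABELS[lo] if lo < len(_LABELS) else "0"
-- ===== Notes on version B (the rewrite author's own statement) =====
-- stated objective: alternative
-- what changed: Replaces the 30-branch linear if/elif chain with a sorted threshold table queried by a hand-written bisect_left binary search (lo/hi loop), then an index lookup into a parallel label list.
import Mathlib
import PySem

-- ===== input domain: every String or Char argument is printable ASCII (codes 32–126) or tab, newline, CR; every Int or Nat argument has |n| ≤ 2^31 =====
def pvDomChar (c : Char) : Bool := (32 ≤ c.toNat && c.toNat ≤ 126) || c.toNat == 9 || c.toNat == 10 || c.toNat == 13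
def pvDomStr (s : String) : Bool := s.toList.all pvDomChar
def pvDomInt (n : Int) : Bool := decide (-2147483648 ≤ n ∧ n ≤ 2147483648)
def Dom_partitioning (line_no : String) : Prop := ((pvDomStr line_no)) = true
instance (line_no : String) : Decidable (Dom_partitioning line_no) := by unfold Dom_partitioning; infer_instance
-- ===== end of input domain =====

-- B replaces A's 30-branch linear if/elif chain with a sorted threshold table queried by a
-- hand-written bisect_left binary search, then an index lookup into a parallel label list.

-- ===== PORT A =====
def partitioning (line_no : String) : String :=
  match PySem.Int.ofChars? (line_no.toList.filter PySem.Chars.isdigit) with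
  | none => ""   -- Python raises ValueError here; excluded by Pre_partitioning
  | some ln =>
    if ln ≤ 13 then "1.1"
    else if ln ≤ 21 then "1.2"
    else if ln ≤ 39 then "2.1.1"
    else if ln ≤ 51 then "2.1.2"
    else if ln ≤ 69 then "2.1.3"
    else if ln ≤ 76 then "2.2.1"
    else if ln ≤ 90 then "2.2.2"
    else if ln ≤ 113 then "2.2.3"
    else if ln ≤ 127 then "2.3.1"
    else if ln ≤ 132 then "2.3.2"
    else if ln ≤ 134 then "2.3.3"
    else if ln ≤ 138 then "3.1.1"
    else if ln ≤ 149 then "3.1.2"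
    else if ln ≤ 162 then "3.1.3"
    else if ln ≤ 169 then "3.1.4"
    else if ln ≤ 184 then "3.2.1"
    else if ln ≤ 197 then "3.2.2"
    else if ln ≤ 205 then "3.2.3"
    else if ln ≤ 210 then "3.2.4"
    else if ln ≤ 221 then "3.2.5"
    else if ln ≤ 227 then "4.1"
    else if ln ≤ 248 then "4.2.1"
    else if ln ≤ 254 then "4.2.2"
    else if ln ≤ 263 then "4.2.3"
    else if ln ≤ 273 then "4.2.4"
    else if ln ≤ 280 then "5.1"
    else if ln ≤ 283 then "5.2"
    else if ln ≤ 310 then "B"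
    else "0"

-- ===== PORT B =====
def pvThresholds : List Int :=
  [13, 21, 39, 51, 69, 76, 90, 113, 127, 132, 134, 138, 149, 162,
   169, 184, 197, 205, 210, 221, 227, 248, 254, 263, 273, 280, 283, 310]

def pvLabels : List String :=
  ["1.1", "1.2", "2.1.1", "2.1.2", "2.1.3", "2.2.1", "2.2.2", "2.2.3",
   "2.3.1", "2.3.2", "2.3.3", "3.1.1", "3.1.2", "3.1.3", "3.1.4",
   "3.2.1", "3.2.2", "3.2.3", "3.2.4", "3.2.5", "4.1",
   "4.2.1", "4.2.2", "4.2.3", "4.2.4", "5.1", "5.2", "B"]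

-- the `while lo < hi` loop of Source B; `_THRESHOLDS[mid]` is always in range (lo ≤ mid < hi ≤ 28), read with getD
def pvBisect (ln : Int) (lo hi : Nat) : Nat :=
  if lo < hi then
    if pvThresholds.getD ((lo + hi) / 2) 0 < ln then pvBisect ln ((lo + hi) / 2 + 1) hi
    else pvBisect ln lo ((lo + hi) / 2)
  else lo
termination_by hi - lo
decreasing_by all_goals omega

def partitioning_alt (line_no : String) : String :=
  match PySem.Int.ofChars? (line_no.toList.filter PySem.Chars.isdigit) with
  | none => ""   -- Python raises ValueError here; excluded by Pre_partitioning
  | some ln =>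
    let lo := pvBisect ln 0 pvThresholds.length
    if lo < pvLabels.length then pvLabels.getD lo "0" else "0"

-- ===== PRECONDITION & SPEC =====
-- Pre_ excludes strings with no digit character, on which int('') raises ValueError (in A and in B alike).
def Pre_partitioning (line_no : String) : Prop :=
  (line_no.toList.filter PySem.Chars.isdigit) ≠ []
instance (line_no : String) : Decidable (Pre_partitioning line_no) := by unfold Pre_partitioning; infer_instance
def pvWitness_partitioning : String := "line 42"

def Spec_partitioning (line_no : String) (out : String) : Prop := out = partitioning_alt line_no
instance (line_no : String) (out : String) : Decidable (Spec_partitioning line_no out) := by unfold Spec_partitioning; infer_instance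

-- ===== CLAIM (what is proved, stated in full; the proofs are below) =====
def Claim_equal_partitioning : Prop := ∀ (line_no : String), Dom_partitioning line_no → Pre_partitioning line_no → Spec_partitioning line_no (partitioning line_no)

-- ===== LEMMAS AND PROOFS =====
-- the threshold table is strictly increasing
theorem pvMono {i j : Nat} (hij : i < j) (hj : j < 28) :
    pvThresholds.getD i 0 < pvThresholds.getD j 0 := by
  have hp : List.Pairwise (· < ·) pvThresholds := by decide
  have hi' : i < pvThresholds.length := by simp [pvThresholds]; omega
  have hj' : j < pvThresholds.length := by simp [pvThresholds]; omega
  rw [List.getD_eq_getElem _ _ hi', List.getD_eq_getElem _ _ hj']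
  exact List.pairwise_iff_getElem.mp hp i j hi' hj' hij

-- bisect_left invariant: everything left of the result is < ln, everything from the result on is ≥ ln
theorem bisect_correct (ln : Int) (lo hi : Nat) :
    hi ≤ 28 → lo ≤ hi →
    (∀ j, j < lo → pvThresholds.getD j 0 < ln) →
    (∀ j, hi ≤ j → j < 28 → ln ≤ pvThresholds.getD j 0) →
    (∀ j, j < pvBisect ln lo hi → pvThresholds.getD j 0 < ln) ∧
    (∀ j, pvBisect ln lo hi ≤ j → j < 28 → ln ≤ pvThresholds.getD j 0) ∧
    pvBisect ln lo hi ≤ 28 := by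
  fun_induction pvBisect ln lo hi with
  | case1 lo hi hlt hcond ih =>
    intro hh hl hlo hhi
    refine ih hh (by omega) ?_ hhi
    intro j hj
    rcases lt_trichotomy j ((lo + hi) / 2) with h | h | h
    · rcases Nat.lt_or_ge j lo with h' | h'
      · exact hlo j h'
      · exact lt_trans (pvMono h (by omega)) hcond
    · simpa [h] using hcond
    · omega
  | case2 lo hi hlt hcond ih =>
    intro hh hl hlo hhi
    refine ih (by omega) (by omega) hlo ?_
    intro j hj hj28
    rcases Nat.lt_or_ge ((lo + hi) / 2) j with h | h
    · exact le_of_lt (lt_of_le_of_lt (not_lt.mp hcond) (pvMono h hj28))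
    · have : j = (lo + hi) / 2 := by omega
      simpa [this] using not_lt.mp hcond
  | case3 lo hi hge =>
    intro hh hl hlo hhi
    exact ⟨hlo, fun j hj hj28 => hhi j (by omega) hj28, by omega⟩

-- one step of find? over a (threshold, label) list
theorem pvFindStep (ln t : Int) (l d : String) (rest : List (Int × String)) :
    ((((t, l) :: rest).find? (fun p => decide (ln ≤ p.1))).map Prod.snd).getD d
      = if ln ≤ t then l else ((rest.find? (fun p => decide (ln ≤ p.1))).map Prod.snd).getD d := by
  by_cases h : ln ≤ t <;> simp [h]

-- the if/elif chain is first-match search over the zipped table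
theorem chain_eq_table (ln : Int) :
    (
    if ln ≤ 13 then "1.1"
    else if ln ≤ 21 then "1.2"
    else if ln ≤ 39 then "2.1.1"
    else if ln ≤ 51 then "2.1.2"
    else if ln ≤ 69 then "2.1.3"
    else if ln ≤ 76 then "2.2.1"
    else if ln ≤ 90 then "2.2.2"
    else if ln ≤ 113 then "2.2.3"
    else if ln ≤ 127 then "2.3.1"
    else if ln ≤ 132 then "2.3.2"
    else if ln ≤ 134 then "2.3.3"
    else if ln ≤ 138 then "3.1.1"
    else if ln ≤ 149 then "3.1.2"
    else if ln ≤ 162 then "3.1.3"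
    else if ln ≤ 169 then "3.1.4"
    else if ln ≤ 184 then "3.2.1"
    else if ln ≤ 197 then "3.2.2"
    else if ln ≤ 205 then "3.2.3"
    else if ln ≤ 210 then "3.2.4"
    else if ln ≤ 221 then "3.2.5"
    else if ln ≤ 227 then "4.1"
    else if ln ≤ 248 then "4.2.1"
    else if ln ≤ 254 then "4.2.2"
    else if ln ≤ 263 then "4.2.3"
    else if ln ≤ 273 then "4.2.4"
    else if ln ≤ 280 then "5.1"
    else if ln ≤ 283 then "5.2"
    else if ln ≤ 310 then "B"
    else "0")
    = ((((pvThresholds.zip pvLabels).find? (fun p => decide (ln ≤ p.1))).map Prod.snd).getD "0") := by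
  simp only [pvThresholds, pvLabels, List.zip_cons_cons, List.zip_nil_right, pvFindStep,
    List.find?_nil, Option.map_none, Option.getD_none]

-- first-match search over a zip equals indexing at the split point r
theorem pvFindZip (ln : Int) (ts : List Int) : ∀ (ls : List String) (r : Nat),
    ts.length = ls.length → r ≤ ts.length →
    (∀ j, (h : j < ts.length) → (j < r ↔ ts[j] < ln)) →
    (((ts.zip ls).find? (fun p => decide (ln ≤ p.1))).map Prod.snd).getD "0"
      = if h : r < ls.length then ls[r] else "0" := by
  induction ts with
  | nil =>
    intro ls r hlen hr _
    have hls : ls = [] := List.eq_nil_of_length_eq_zero hlen.symm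
    subst hls
    simp
  | cons t ts ih =>
    intro ls r hlen hr hiff
    cases ls with
    | nil => simp at hlen
    | cons l ls' =>
      cases r with
      | zero =>
        have h0 : ln ≤ t := by
          by_contra hc
          have h1 : (t :: ts)[0] < ln := by simpa using (by omega : t < ln)
          exact absurd ((hiff 0 (by simp)).mpr h1) (by omega)
        simp [h0]
      | succ rr =>
        have h0 : t < ln := by simpa using (hiff 0 (by simp)).mp (by omega)
        rw [List.zip_cons_cons, pvFindStep, if_neg (by omega)]
        rw [ih ls' rr (by simpa using hlen) (by simpa using hr)
          (fun j hj => by simpa using hiff (j + 1) (by simpa using hj))]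
        by_cases hlt : rr < ls'.length
        · rw [dif_pos hlt, dif_pos (by simpa using hlt), List.getElem_cons_succ]
        · rw [dif_neg hlt, dif_neg (by simpa using hlt)]

theorem chain_eq_bisect (ln : Int) :
    (
    if ln ≤ 13 then "1.1"
    else if ln ≤ 21 then "1.2"
    else if ln ≤ 39 then "2.1.1"
    else if ln ≤ 51 then "2.1.2"
    else if ln ≤ 69 then "2.1.3"
    else if ln ≤ 76 then "2.2.1"
    else if ln ≤ 90 then "2.2.2"
    else if ln ≤ 113 then "2.2.3"
    else if ln ≤ 127 then "2.3.1"
    else if ln ≤ 132 then "2.3.2"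
    else if ln ≤ 134 then "2.3.3"
    else if ln ≤ 138 then "3.1.1"
    else if ln ≤ 149 then "3.1.2"
    else if ln ≤ 162 then "3.1.3"
    else if ln ≤ 169 then "3.1.4"
    else if ln ≤ 184 then "3.2.1"
    else if ln ≤ 197 then "3.2.2"
    else if ln ≤ 205 then "3.2.3"
    else if ln ≤ 210 then "3.2.4"
    else if ln ≤ 221 then "3.2.5"
    else if ln ≤ 227 then "4.1"
    else if ln ≤ 248 then "4.2.1"
    else if ln ≤ 254 then "4.2.2"
    else if ln ≤ 263 then "4.2.3"
    else if ln ≤ 273 then "4.2.4"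
    else if ln ≤ 280 then "5.1"
    else if ln ≤ 283 then "5.2"
    else if ln ≤ 310 then "B"
    else "0")
    = (let lo := pvBisect ln 0 pvThresholds.length
       if lo < pvLabels.length then pvLabels.getD lo "0" else "0") := by
  obtain ⟨H1, H2, H3⟩ := bisect_correct ln 0 28 (by omega) (by omega)
    (fun j hj => absurd hj (by omega)) (fun j hj hj28 => absurd hj28 (by omega))
  have hiff : ∀ j, (h : j < pvThresholds.length) →
      (j < pvBisect ln 0 28 ↔ pvThresholds[j] < ln) := by
    intro j h
    constructor
    · intro hj
      rw [← List.getD_eq_getElem _ _ h]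
      exact H1 j hj
    · intro hlt
      by_contra hge
      have := H2 j (by omega) (by simpa [pvThresholds] using h)
      rw [List.getD_eq_getElem _ _ h] at this
      omega
  show _ = (if pvBisect ln 0 28 < pvLabels.length then pvLabels.getD (pvBisect ln 0 28) "0" else "0")
  rw [chain_eq_table ln,
    pvFindZip ln pvThresholds pvLabels (pvBisect ln 0 28) rfl (by simpa [pvThresholds] using H3) hiff]
  by_cases hr : pvBisect ln 0 28 < pvLabels.length
  · rw [dif_pos hr, if_pos hr, List.getD_eq_getElem _ _ hr]
  · rw [dif_neg hr, if_neg hr]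

-- ===== VERDICT (by name: the statement is the Claim_ definition above) =====
theorem partitioning_spec : Claim_equal_partitioning := by
  intro line_no _ _
  unfold Spec_partitioning partitioning partitioning_alt
  cases PySem.Int.ofChars? (line_no.toList.filter PySem.Chars.isdigit) with
  | none => rfl
  | some ln => exact chain_eq_bisect ln
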